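-- pv_equiv track=rewrite | github.com/Najoj/advent-of-code | 2019/3/b.py | find
-- ===== SOURCE A (Python) =====
-- def find(saves, li):
--         rl = []
--         for e in saves:
--             r = 0
--             for l in li:
--                 r+=1
--                 if l == e:
--                     rl += [r]
--         return min(rl)
-- ===== SOURCE B (Python) =====
-- def find(saves, li):
--     s = set(saves)
--     return min(i for i, l in enumerate(li, 1) if l in s)
-- ===== Notes on version B (the rewrite author's own statement) =====
-- stated objective: faster
-- what changed: Instead of rescanning li once per element of saves and collecting all matching positions, B builds a set of saves once and does a single enumerate pass over li, taking the min of matching 1-based positions.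
import Mathlib
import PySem

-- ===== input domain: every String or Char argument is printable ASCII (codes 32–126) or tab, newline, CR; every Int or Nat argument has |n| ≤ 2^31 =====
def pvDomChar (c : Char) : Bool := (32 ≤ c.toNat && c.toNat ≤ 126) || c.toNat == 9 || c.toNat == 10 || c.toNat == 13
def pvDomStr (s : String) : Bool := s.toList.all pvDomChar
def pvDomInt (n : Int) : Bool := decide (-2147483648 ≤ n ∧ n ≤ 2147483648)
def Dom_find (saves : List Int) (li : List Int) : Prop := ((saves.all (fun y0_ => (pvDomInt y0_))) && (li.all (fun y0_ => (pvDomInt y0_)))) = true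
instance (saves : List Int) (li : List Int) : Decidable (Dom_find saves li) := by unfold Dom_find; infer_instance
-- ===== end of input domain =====

-- B replaces A's per-save rescans of li by one set of saves plus a single enumerate pass (faster).

-- ===== PORT A =====
def find (saves : List Int) (li : List Int) : Int :=
  let rl : List Int := saves.foldl (fun rl e =>
    (li.foldl (fun (st : Int × List Int) l =>
      let r := st.1 + 1
      (r, if l == e then st.2 ++ [r] else st.2)) ((0 : Int), rl)).2) []
  match PySem.List.min? rl (fun x => x) with
  | some m => m
  | none => 0   -- min([]) raises ValueError in Python; excluded by Pre_find

-- ===== PORT B =====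
def find_alt (saves : List Int) (li : List Int) : Int :=
  let s : PySem.Set Int := PySem.Set.ofList saves
  let cand : List Int := (PySem.List.enumerate li 1).filterMap
    (fun p => if PySem.Set.contains s p.2 then some p.1 else none)
  match PySem.List.min? cand (fun x => x) with
  | some m => m
  | none => 0   -- min of an empty generator raises ValueError; excluded by Pre_find

-- ===== PRECONDITION & SPEC =====
-- Pre_ excludes exactly the inputs with no element of li in saves, where both A's and B's min() raise ValueError.
def Pre_find (saves : List Int) (li : List Int) : Prop := ∃ x ∈ li, x ∈ saves
instance (saves : List Int) (li : List Int) : Decidable (Pre_find saves li) := by unfold Pre_find; infer_instance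
def pvWitness_find : List Int × List Int := ([3, 1], [2, 1, 3])

def Spec_find (saves : List Int) (li : List Int) (out : Int) : Prop := out = find_alt saves li
instance (saves : List Int) (li : List Int) (out : Int) : Decidable (Spec_find saves li out) := by unfold Spec_find; infer_instance

-- ===== CLAIM (what is proved, stated in full; the proofs are below) =====
def Claim_equal_find : Prop := ∀ (saves : List Int) (li : List Int), Dom_find saves li → Pre_find saves li → Spec_find saves li (find saves li)

-- ===== LEMMAS AND PROOFS =====

-- membership in A's inner loop result
theorem memA_inner (e : Int) (li : List Int) (r : Int) (rl : List Int) (p : Int) :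
    p ∈ (li.foldl (fun (st : Int × List Int) l =>
          ((st.1 + 1), if l == e then st.2 ++ [st.1 + 1] else st.2)) (r, rl)).2 ↔
    p ∈ rl ∨ ∃ k : Nat, ∃ h : k < li.length, li[k] = e ∧ p = r + k + 1 := by
  induction li generalizing r rl with
  | nil => simp
  | cons x xs ih =>
    simp only [List.foldl_cons]
    rw [ih]
    constructor
    · rintro (hp | ⟨k, hk, hke, hpe⟩)
      · by_cases hx : x == e
        · simp [hx] at hp
          rcases hp with hp | hp
          · exact Or.inl hp
          · refine Or.inr ⟨0, by simp, by simpa using hx, by omega⟩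
        · simp [hx] at hp
          exact Or.inl hp
      · exact Or.inr ⟨k + 1, by simpa using hk, by simpa using hke, by push_cast; omega⟩
    · rintro (hp | ⟨k, hk, hke, hpe⟩)
      · left; split <;> simp [hp]
      · cases k with
        | zero =>
          left
          simp at hke
          simp [hke]
          right; omega
        | succ k =>
          right
          exact ⟨k, by simpa using hk, by simpa using hke, by push_cast at hpe ⊢; omega⟩

theorem memA (saves li : List Int) (acc : List Int) (p : Int) :
    p ∈ saves.foldl (fun rl e =>
      (li.foldl (fun (st : Int × List Int) l =>
        ((st.1 + 1), if l == e then st.2 ++ [st.1 + 1] else st.2)) ((0 : Int), rl)).2) acc ↔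
    p ∈ acc ∨ ∃ k : Nat, ∃ h : k < li.length, li[k] ∈ saves ∧ p = k + 1 := by
  induction saves generalizing acc with
  | nil => simp
  | cons e es ih =>
    simp only [List.foldl_cons]
    rw [ih]
    constructor
    · rintro (hp | ⟨k, hk, hks, hpe⟩)
      · rw [memA_inner] at hp
        rcases hp with hp | ⟨k, hk, hke, hpe⟩
        · exact Or.inl hp
        · exact Or.inr ⟨k, hk, by simp [hke], by omega⟩
      · exact Or.inr ⟨k, hk, by simp [hks], hpe⟩
    · rintro (hp | ⟨k, hk, hks, hpe⟩)
      · left; rw [memA_inner]; exact Or.inl hp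
      · simp only [List.mem_cons] at hks
        rcases hks with h | h
        · left; rw [memA_inner]; exact Or.inr ⟨k, hk, h, by omega⟩
        · exact Or.inr ⟨k, hk, h, hpe⟩

theorem memB (saves li : List Int) (p : Int) :
    p ∈ (PySem.List.enumerate li 1).filterMap
        (fun q => if PySem.Set.contains (PySem.Set.ofList saves) q.2 then some q.1 else none) ↔
    ∃ k : Nat, ∃ h : k < li.length, li[k] ∈ saves ∧ p = k + 1 := by
  simp only [List.mem_filterMap]
  constructor
  · rintro ⟨q, hq, hif⟩
    rw [PySem.List.mem_enumerate_iff] at hq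
    obtain ⟨k, hk, rfl⟩ := hq
    simp [PySem.Set.contains, PySem.Set.mem_ofList] at hif
    exact ⟨k, hk, hif.1, by omega⟩
  · rintro ⟨k, hk, hks, rfl⟩
    refine ⟨(1 + k, li[k]), ?_, ?_⟩
    · rw [PySem.List.mem_enumerate_iff]; exact ⟨k, hk, rfl⟩
    · simp [PySem.Set.contains, PySem.Set.mem_ofList, hks]; omega

-- ===== VERDICT (by name: the statement is the Claim_ definition above) =====
theorem find_spec : Claim_equal_find := by
  intro saves li _ hpre
  obtain ⟨x, hxli, hxs⟩ := hpre
  obtain ⟨k0, hk0, hx0⟩ := List.mem_iff_getElem.mp hxli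
  unfold Spec_find find find_alt
  simp only
  have hsame : ∀ p : Int,
      p ∈ saves.foldl (fun rl e =>
        (li.foldl (fun (st : Int × List Int) l =>
          ((st.1 + 1), if l == e then st.2 ++ [st.1 + 1] else st.2)) ((0 : Int), rl)).2) [] ↔
      p ∈ (PySem.List.enumerate li 1).filterMap
        (fun q => if PySem.Set.contains (PySem.Set.ofList saves) q.2 then some q.1 else none) := by
    intro p
    rw [memA, memB]
    simp
  have hmem : ((k0 : Int) + 1) ∈ saves.foldl (fun rl e =>
        (li.foldl (fun (st : Int × List Int) l =>
          ((st.1 + 1), if l == e then st.2 ++ [st.1 + 1] else st.2)) ((0 : Int), rl)).2) [] := by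
    rw [memA]
    exact Or.inr ⟨k0, hk0, by rw [hx0]; exact hxs, rfl⟩
  -- both min?'s are some, and the minima coincide
  cases hA : PySem.List.min? (saves.foldl (fun rl e =>
        (li.foldl (fun (st : Int × List Int) l =>
          ((st.1 + 1), if l == e then st.2 ++ [st.1 + 1] else st.2)) ((0 : Int), rl)).2) []) (fun x => x) with
  | none =>
    rw [PySem.List.min?_eq_none_iff] at hA
    rw [hA] at hmem
    simp at hmem
  | some mA =>
    cases hB : PySem.List.min? ((PySem.List.enumerate li 1).filterMap
        (fun q => if PySem.Set.contains (PySem.Set.ofList saves) q.2 then some q.1 else none)) (fun x => x) with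
    | none =>
      rw [PySem.List.min?_eq_none_iff] at hB
      have := (hsame _).mp hmem
      rw [hB] at this
      simp at this
    | some mB =>
      simp only
      have hmA := PySem.List.min?_mem hA
      have hmB := PySem.List.min?_mem hB
      have h1 : mA ≤ mB := PySem.List.min?_isMin hA mB ((hsame mB).mpr hmB)
      have h2 : mB ≤ mA := PySem.List.min?_isMin hB mA ((hsame mA).mp hmA)
      omega
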